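-- pv_equiv track=rewrite | github.com/jono8001/daydine | rcs_scoring_stratford.py | _tier1_google_types
-- ===== SOURCE A (Python) =====
-- _GTYPE_RULES = [
--     ({"indian_restaurant", "bangladeshi_restaurant"}, "Indian Restaurant"),
--     ({"italian_restaurant", "pizza_restaurant"}, "Italian Restaurant"),
--     ({"chinese_restaurant"}, "Chinese Restaurant"),
--     ({"thai_restaurant"}, "Thai Restaurant"),
--     ({"japanese_restaurant"}, "Japanese Restaurant"),
--     ({"french_restaurant", "bistro"}, "French Restaurant"),
--     ({"turkish_restaurant", "greek_restaurant"}, "Mediterranean Restaurant"),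
--     ({"asian_restaurant", "vietnamese_restaurant", "noodle_shop"}, "Asian Restaurant"),
--     ({"brazilian_restaurant", "american_restaurant", "hamburger_restaurant",
--       "chicken_restaurant", "chicken_wings_restaurant", "steak_house"}, "American / Grill"),
--     ({"british_restaurant", "fish_and_chips_restaurant", "seafood_restaurant"}, "British Restaurant"),
--     ({"vegan_restaurant", "vegetarian_restaurant"}, "Vegan / Vegetarian"),
--     ({"fine_dining_restaurant"}, "Fine Dining"),
--     ({"fast_food_restaurant", "sandwich_shop", "snack_bar"}, "Fast Food / Quick Service"),
--     ({"meal_takeaway", "food_delivery"}, "Takeaway"),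
--     ({"pub", "gastropub", "brewpub", "beer_garden"}, "Pub / Bar"),
--     ({"bar", "wine_bar", "cocktail_bar", "lounge_bar", "bar_and_grill"}, "Pub / Bar"),
--     ({"coffee_shop", "coffee_stand", "coffee_roastery", "tea_house"}, "Cafe / Coffee Shop"),
--     ({"cafe", "breakfast_restaurant", "brunch_restaurant", "diner"}, "Cafe / Coffee Shop"),
--     ({"bakery", "pastry_shop", "cake_shop", "confectionery",
--       "dessert_shop", "ice_cream_shop"}, "Bakery / Desserts"),
--     ({"hotel", "lodging", "bed_and_breakfast", "inn"}, "Hotel / Accommodation"),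
--     ({"catering_service"}, "Catering"),
-- ]
--
-- def _tier1_google_types(record):
--     """Tier 1: classify from Google place types. Returns (category, True) or (None, False)."""
--     gty = record.get("gty")
--     if not gty or not isinstance(gty, list):
--         return None, False
--
--     types_set = set(gty)
--     for match_types, category in _GTYPE_RULES:
--         if types_set & match_types:
--             return category, True
--
--     if "restaurant" in types_set or "family_restaurant" in types_set:
--         return "Restaurant (General)", True
--     if "food" in types_set:
--         return "Food & Drink", True
--     return None, False
-- ===== SOURCE B (Python) =====
-- # Flat lookup table: Google place type -> (priority rank, category).
-- # Ranks follow the original rule order; the two general fallbacks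
-- # ("restaurant"/"family_restaurant" -> rank 21, "food" -> rank 22) sit below
-- # every concrete rule, so any concrete match wins over them.
-- _TYPE_INDEX = {
--     "indian_restaurant": (0, "Indian Restaurant"),
--     "bangladeshi_restaurant": (0, "Indian Restaurant"),
--     "italian_restaurant": (1, "Italian Restaurant"),
--     "pizza_restaurant": (1, "Italian Restaurant"),
--     "chinese_restaurant": (2, "Chinese Restaurant"),
--     "thai_restaurant": (3, "Thai Restaurant"),
--     "japanese_restaurant": (4, "Japanese Restaurant"),
--     "french_restaurant": (5, "French Restaurant"),
--     "bistro": (5, "French Restaurant"),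
--     "turkish_restaurant": (6, "Mediterranean Restaurant"),
--     "greek_restaurant": (6, "Mediterranean Restaurant"),
--     "asian_restaurant": (7, "Asian Restaurant"),
--     "vietnamese_restaurant": (7, "Asian Restaurant"),
--     "noodle_shop": (7, "Asian Restaurant"),
--     "brazilian_restaurant": (8, "American / Grill"),
--     "american_restaurant": (8, "American / Grill"),
--     "hamburger_restaurant": (8, "American / Grill"),
--     "chicken_restaurant": (8, "American / Grill"),
--     "chicken_wings_restaurant": (8, "American / Grill"),
--     "steak_house": (8, "American / Grill"),
--     "british_restaurant": (9, "British Restaurant"),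
--     "fish_and_chips_restaurant": (9, "British Restaurant"),
--     "seafood_restaurant": (9, "British Restaurant"),
--     "vegan_restaurant": (10, "Vegan / Vegetarian"),
--     "vegetarian_restaurant": (10, "Vegan / Vegetarian"),
--     "fine_dining_restaurant": (11, "Fine Dining"),
--     "fast_food_restaurant": (12, "Fast Food / Quick Service"),
--     "sandwich_shop": (12, "Fast Food / Quick Service"),
--     "snack_bar": (12, "Fast Food / Quick Service"),
--     "meal_takeaway": (13, "Takeaway"),
--     "food_delivery": (13, "Takeaway"),
--     "pub": (14, "Pub / Bar"),
--     "gastropub": (14, "Pub / Bar"),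
--     "brewpub": (14, "Pub / Bar"),
--     "beer_garden": (14, "Pub / Bar"),
--     "bar": (15, "Pub / Bar"),
--     "wine_bar": (15, "Pub / Bar"),
--     "cocktail_bar": (15, "Pub / Bar"),
--     "lounge_bar": (15, "Pub / Bar"),
--     "bar_and_grill": (15, "Pub / Bar"),
--     "coffee_shop": (16, "Cafe / Coffee Shop"),
--     "coffee_stand": (16, "Cafe / Coffee Shop"),
--     "coffee_roastery": (16, "Cafe / Coffee Shop"),
--     "tea_house": (16, "Cafe / Coffee Shop"),
--     "cafe": (17, "Cafe / Coffee Shop"),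
--     "breakfast_restaurant": (17, "Cafe / Coffee Shop"),
--     "brunch_restaurant": (17, "Cafe / Coffee Shop"),
--     "diner": (17, "Cafe / Coffee Shop"),
--     "bakery": (18, "Bakery / Desserts"),
--     "pastry_shop": (18, "Bakery / Desserts"),
--     "cake_shop": (18, "Bakery / Desserts"),
--     "confectionery": (18, "Bakery / Desserts"),
--     "dessert_shop": (18, "Bakery / Desserts"),
--     "ice_cream_shop": (18, "Bakery / Desserts"),
--     "hotel": (19, "Hotel / Accommodation"),
--     "lodging": (19, "Hotel / Accommodation"),
--     "bed_and_breakfast": (19, "Hotel / Accommodation"),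
--     "inn": (19, "Hotel / Accommodation"),
--     "catering_service": (20, "Catering"),
--     "restaurant": (21, "Restaurant (General)"),
--     "family_restaurant": (21, "Restaurant (General)"),
--     "food": (22, "Food & Drink"),}
--
--
-- def _tier1_google_types(record):
--     """Tier 1: classify from Google place types. Returns (category, True) or (None, False)."""
--     gty = record.get("gty")
--     if not gty or not isinstance(gty, list):
--         return None, False
--
--     best_rank, best_cat = None, None
--     for t in gty:
--         hit = _TYPE_INDEX.get(t)
--         if hit is not None and (best_rank is None or hit[0] < best_rank):
--             best_rank, best_cat = hit
--     if best_rank is None: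
--         return None, False
--     return best_cat, True
-- ===== Notes on version B (the rewrite author's own statement) =====
-- stated objective: alternative
-- what changed: B drops the rule list entirely: it carries a flat literal lookup table mapping each Google type string to (priority rank, category), with the two general fallbacks ranked below all concrete rules, and classifies in a single min-rank pass over the input types instead of scanning all rules for the first one intersecting the input set.
import Mathlib
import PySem

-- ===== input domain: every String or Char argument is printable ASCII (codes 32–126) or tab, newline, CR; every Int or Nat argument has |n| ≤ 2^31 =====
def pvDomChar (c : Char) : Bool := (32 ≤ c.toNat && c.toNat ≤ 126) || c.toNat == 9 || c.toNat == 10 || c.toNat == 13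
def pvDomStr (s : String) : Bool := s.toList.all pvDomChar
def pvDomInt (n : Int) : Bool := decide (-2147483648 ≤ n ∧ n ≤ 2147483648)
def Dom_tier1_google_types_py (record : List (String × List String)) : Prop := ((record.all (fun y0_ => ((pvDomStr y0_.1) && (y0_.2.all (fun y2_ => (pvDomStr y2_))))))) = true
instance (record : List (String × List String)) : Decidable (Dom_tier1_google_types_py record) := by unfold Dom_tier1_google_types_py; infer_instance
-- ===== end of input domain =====

-- B replaces A's scan of the rule list (first rule intersecting the input types) by a flat
-- literal type -> (rank, category) table and a single min-rank pass over the input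
-- (objective: alternative; same exact results).

-- ===== PORT A =====
-- _GTYPE_RULES: each Python set literal is kept as the list of its (distinct) elements in source order.
def gtypeRules : List (List String × String) := [
  (["indian_restaurant", "bangladeshi_restaurant"], "Indian Restaurant"),
  (["italian_restaurant", "pizza_restaurant"], "Italian Restaurant"),
  (["chinese_restaurant"], "Chinese Restaurant"),
  (["thai_restaurant"], "Thai Restaurant"),
  (["japanese_restaurant"], "Japanese Restaurant"),
  (["french_restaurant", "bistro"], "French Restaurant"),
  (["turkish_restaurant", "greek_restaurant"], "Mediterranean Restaurant"),
  (["asian_restaurant", "vietnamese_restaurant", "noodle_shop"], "Asian Restaurant"),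
  (["brazilian_restaurant", "american_restaurant", "hamburger_restaurant",
    "chicken_restaurant", "chicken_wings_restaurant", "steak_house"], "American / Grill"),
  (["british_restaurant", "fish_and_chips_restaurant", "seafood_restaurant"], "British Restaurant"),
  (["vegan_restaurant", "vegetarian_restaurant"], "Vegan / Vegetarian"),
  (["fine_dining_restaurant"], "Fine Dining"),
  (["fast_food_restaurant", "sandwich_shop", "snack_bar"], "Fast Food / Quick Service"),
  (["meal_takeaway", "food_delivery"], "Takeaway"),
  (["pub", "gastropub", "brewpub", "beer_garden"], "Pub / Bar"),
  (["bar", "wine_bar", "cocktail_bar", "lounge_bar", "bar_and_grill"], "Pub / Bar"),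
  (["coffee_shop", "coffee_stand", "coffee_roastery", "tea_house"], "Cafe / Coffee Shop"),
  (["cafe", "breakfast_restaurant", "brunch_restaurant", "diner"], "Cafe / Coffee Shop"),
  (["bakery", "pastry_shop", "cake_shop", "confectionery",
    "dessert_shop", "ice_cream_shop"], "Bakery / Desserts"),
  (["hotel", "lodging", "bed_and_breakfast", "inn"], "Hotel / Accommodation"),
  (["catering_service"], "Catering")]

-- 'types_set & match_types' is truthy iff the intersection is non-empty.
def tier1_google_types_py (record : List (String × List String)) : Option String × Bool :=
  match (PySem.Dict.mk record).get? "gty" with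
  | none => (none, false)                   -- record.get("gty") is None: falsy
  | some gty =>
    if gty.isEmpty then (none, false)       -- 'not gty' (isinstance(gty, list) always holds here)
    else
      let typesSet : PySem.Set String := PySem.Set.ofList gty
      match gtypeRules.find? (fun r => !(PySem.Set.inter typesSet r.1).isEmpty) with
      | some r => (some r.2, true)
      | none =>
        if typesSet.contains "restaurant" || typesSet.contains "family_restaurant" then
          (some "Restaurant (General)", true)
        else if typesSet.contains "food" then (some "Food & Drink", true)
        else (none, false)

-- ===== PORT B =====
-- _TYPE_INDEX: the flat literal table of Source B, type -> (rank, category).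
def typeIndex : PySem.Dict String (Int × String) := PySem.Dict.mk [
  ("indian_restaurant", (0, "Indian Restaurant")),
  ("bangladeshi_restaurant", (0, "Indian Restaurant")),
  ("italian_restaurant", (1, "Italian Restaurant")),
  ("pizza_restaurant", (1, "Italian Restaurant")),
  ("chinese_restaurant", (2, "Chinese Restaurant")),
  ("thai_restaurant", (3, "Thai Restaurant")),
  ("japanese_restaurant", (4, "Japanese Restaurant")),
  ("french_restaurant", (5, "French Restaurant")),
  ("bistro", (5, "French Restaurant")),
  ("turkish_restaurant", (6, "Mediterranean Restaurant")),
  ("greek_restaurant", (6, "Mediterranean Restaurant")),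
  ("asian_restaurant", (7, "Asian Restaurant")),
  ("vietnamese_restaurant", (7, "Asian Restaurant")),
  ("noodle_shop", (7, "Asian Restaurant")),
  ("brazilian_restaurant", (8, "American / Grill")),
  ("american_restaurant", (8, "American / Grill")),
  ("hamburger_restaurant", (8, "American / Grill")),
  ("chicken_restaurant", (8, "American / Grill")),
  ("chicken_wings_restaurant", (8, "American / Grill")),
  ("steak_house", (8, "American / Grill")),
  ("british_restaurant", (9, "British Restaurant")),
  ("fish_and_chips_restaurant", (9, "British Restaurant")),
  ("seafood_restaurant", (9, "British Restaurant")),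
  ("vegan_restaurant", (10, "Vegan / Vegetarian")),
  ("vegetarian_restaurant", (10, "Vegan / Vegetarian")),
  ("fine_dining_restaurant", (11, "Fine Dining")),
  ("fast_food_restaurant", (12, "Fast Food / Quick Service")),
  ("sandwich_shop", (12, "Fast Food / Quick Service")),
  ("snack_bar", (12, "Fast Food / Quick Service")),
  ("meal_takeaway", (13, "Takeaway")),
  ("food_delivery", (13, "Takeaway")),
  ("pub", (14, "Pub / Bar")),
  ("gastropub", (14, "Pub / Bar")),
  ("brewpub", (14, "Pub / Bar")),
  ("beer_garden", (14, "Pub / Bar")),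
  ("bar", (15, "Pub / Bar")),
  ("wine_bar", (15, "Pub / Bar")),
  ("cocktail_bar", (15, "Pub / Bar")),
  ("lounge_bar", (15, "Pub / Bar")),
  ("bar_and_grill", (15, "Pub / Bar")),
  ("coffee_shop", (16, "Cafe / Coffee Shop")),
  ("coffee_stand", (16, "Cafe / Coffee Shop")),
  ("coffee_roastery", (16, "Cafe / Coffee Shop")),
  ("tea_house", (16, "Cafe / Coffee Shop")),
  ("cafe", (17, "Cafe / Coffee Shop")),
  ("breakfast_restaurant", (17, "Cafe / Coffee Shop")),
  ("brunch_restaurant", (17, "Cafe / Coffee Shop")),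
  ("diner", (17, "Cafe / Coffee Shop")),
  ("bakery", (18, "Bakery / Desserts")),
  ("pastry_shop", (18, "Bakery / Desserts")),
  ("cake_shop", (18, "Bakery / Desserts")),
  ("confectionery", (18, "Bakery / Desserts")),
  ("dessert_shop", (18, "Bakery / Desserts")),
  ("ice_cream_shop", (18, "Bakery / Desserts")),
  ("hotel", (19, "Hotel / Accommodation")),
  ("lodging", (19, "Hotel / Accommodation")),
  ("bed_and_breakfast", (19, "Hotel / Accommodation")),
  ("inn", (19, "Hotel / Accommodation")),
  ("catering_service", (20, "Catering")),
  ("restaurant", (21, "Restaurant (General)")),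
  ("family_restaurant", (21, "Restaurant (General)")),
  ("food", (22, "Food & Drink"))]

def tier1_google_types_py_alt (record : List (String × List String)) : Option String × Bool :=
  match (PySem.Dict.mk record).get? "gty" with
  | none => (none, false)
  | some gty =>
    if gty.isEmpty then (none, false)
    else
      match gty.foldl (fun best t =>
          match typeIndex.get? t with
          | some hit =>
            match best with
            | none => some hit
            | some b => if hit.1 < b.1 then some hit else some b
          | none => best) none with
      | some b => (some b.2, true)
      | none => (none, false)

-- ===== PRECONDITION & SPEC =====
def Spec_tier1_google_types_py (record : List (String × List String)) (out : Option String × Bool) : Prop := out = tier1_google_types_py_alt record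
instance (record : List (String × List String)) (out : Option String × Bool) : Decidable (Spec_tier1_google_types_py record out) := by unfold Spec_tier1_google_types_py; infer_instance

-- ===== CLAIM (what is proved, stated in full; the proofs are below) =====
def Claim_equal_tier1_google_types_py : Prop := ∀ (record : List (String × List String)), Dom_tier1_google_types_py record → Spec_tier1_google_types_py record (tier1_google_types_py record)

-- ===== LEMMAS AND PROOFS =====

-- the two general fallbacks of A's cascade, as two extra rules ranked below all of gtypeRules
def fallbackRules : List (List String × String) := [
  (["restaurant", "family_restaurant"], "Restaurant (General)"),
  (["food"], "Food & Drink")]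

-- B's loop body, abstracted over the looked-up hit.
def bstep (best h : Option (Int × String)) : Option (Int × String) :=
  match h with
  | some hit =>
    match best with
    | none => some hit
    | some b => if hit.1 < b.1 then some hit else some b
  | none => best

-- rank/category of the first rule (from index i on) whose type list contains t.
def firstHit : List (List String × String) → Int → String → Option (Int × String)
  | [], _, _ => none
  | r :: rs, i, t => if t ∈ r.1 then some (i, r.2) else firstHit rs (i + 1) t

-- same, over an already-enumerated rule list.
def firstHitE : List (Int × (List String × String)) → String → Option (Int × String)
  | [], _ => none
  | p :: ps, t => if t ∈ p.2.1 then some (p.1, p.2.2) else firstHitE ps t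

def shift1 (o : Option (Int × String)) : Option (Int × String) := o.map (fun p => (p.1 + 1, p.2))

theorem find?_congr' {α : Type} {p q : α → Bool} {l : List α}
    (h : ∀ a ∈ l, p a = q a) : l.find? p = l.find? q := by
  induction l with
  | nil => rfl
  | cons a l ih =>
    rw [List.find?_cons, List.find?_cons, h a (List.mem_cons_self ..),
      ih (fun b hb => h b (List.mem_cons_of_mem _ hb))]

theorem get?_foldl_insert_const (ts : List String) (v : Int × String)
    (d : PySem.Dict String (Int × String)) (t : String) :
    (ts.foldl (fun d s => d.insert s v) d).get? t = if t ∈ ts then some v else d.get? t := by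
  induction ts generalizing d with
  | nil => simp
  | cons s ts ih =>
    simp only [List.foldl_cons, ih, PySem.Dict.get?_insert, List.mem_cons]
    by_cases h1 : t ∈ ts <;> by_cases h2 : t = s <;> simp [h1, h2]

theorem firstHitE_eq_none (L : List (Int × (List String × String))) (t : String)
    (h : t ∉ L.flatMap (fun p => p.2.1)) : firstHitE L t = none := by
  induction L with
  | nil => rfl
  | cons p ps ih =>
    simp only [List.flatMap_cons, List.mem_append] at h
    rw [not_or] at h
    simp [firstHitE, h.1, ih h.2]

theorem get?_build (L : List (Int × (List String × String)))
    (d : PySem.Dict String (Int × String)) (t : String)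
    (hnd : (L.flatMap (fun p => p.2.1)).Nodup)
    (hdisj : ∀ s ∈ L.flatMap (fun p => p.2.1), d.get? s = none) :
    (L.foldl (fun d p => p.2.1.foldl (fun d t => d.insert t (p.1, p.2.2)) d) d).get? t
      = (firstHitE L t).or (d.get? t) := by
  induction L generalizing d with
  | nil => simp [firstHitE]
  | cons p ps ih =>
    simp only [List.flatMap_cons, List.nodup_append] at hnd
    simp only [List.flatMap_cons, List.mem_append] at hdisj
    simp only [List.foldl_cons]
    rw [ih _ hnd.2.1]
    · by_cases hm : t ∈ p.2.1
      · have hn : firstHitE ps t = none := by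
          apply firstHitE_eq_none
          intro hmem
          exact hnd.2.2 t hm t hmem rfl
        simp [firstHitE, hm, hn, get?_foldl_insert_const]
      · simp [firstHitE, hm, get?_foldl_insert_const]
    · intro s hs
      rw [get?_foldl_insert_const]
      have : s ∉ p.2.1 := fun hc => hnd.2.2 s hc s hs rfl
      simp [this, hdisj s (Or.inr hs)]

theorem firstHitE_enumerate (R : List (List String × String)) (i : Int) (t : String) :
    firstHitE (PySem.List.enumerate R i) t = firstHit R i t := by
  induction R generalizing i with
  | nil => rfl
  | cons r rs ih => simp [PySem.List.enumerate_cons, firstHitE, firstHit, ih]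

-- B's literal table is exactly the table built rule-by-rule from gtypeRules ++ fallbackRules.
set_option maxRecDepth 4000 in
theorem typeIndex_eq_build :
    typeIndex = (PySem.List.enumerate (gtypeRules ++ fallbackRules)).foldl
      (fun d p => p.2.1.foldl (fun d t => d.insert t (p.1, p.2.2)) d)
      PySem.Dict.empty := by decide

theorem typeIndex_get? (t : String) :
    typeIndex.get? t = firstHit (gtypeRules ++ fallbackRules) 0 t := by
  rw [typeIndex_eq_build, get?_build _ _ _ (by decide) (by intro s _; rfl)]
  simp [firstHitE_enumerate]

theorem firstHit_succ (R : List (List String × String)) (i : Int) (t : String) :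
    firstHit R (i + 1) t = shift1 (firstHit R i t) := by
  induction R generalizing i with
  | nil => rfl
  | cons r rs ih =>
    by_cases h : t ∈ r.1 <;> simp [firstHit, h, ih, shift1]

theorem firstHit_le (R : List (List String × String)) (i : Int) (t : String)
    (p : Int × String) (h : firstHit R i t = some p) : i ≤ p.1 := by
  induction R generalizing i with
  | nil => simp [firstHit] at h
  | cons r rs ih =>
    by_cases hm : t ∈ r.1
    · rw [firstHit, if_pos hm, Option.some_inj] at h
      simp [← h]
    · rw [firstHit, if_neg hm] at h
      have := ih (i + 1) h
      omega

theorem bstep_shift (b h : Option (Int × String)) :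
    bstep (shift1 b) (shift1 h) = shift1 (bstep b h) := by
  cases h with
  | none => rfl
  | some hp =>
    cases b with
    | none => rfl
    | some bp =>
      simp only [bstep, shift1, Option.map_some]
      by_cases hlt : hp.1 < bp.1 <;> [skip; skip] <;>
        · have : (hp.1 + 1 < bp.1 + 1) = (hp.1 < bp.1) := by
            apply propext; omega
          simp [hlt, this]

theorem fold_shift (f : String → Option (Int × String)) (gty : List String)
    (acc : Option (Int × String)) :
    gty.foldl (fun b t => bstep b (shift1 (f t))) (shift1 acc)
      = shift1 (gty.foldl (fun b t => bstep b (f t)) acc) := by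
  induction gty generalizing acc with
  | nil => rfl
  | cons t ts ih => simp only [List.foldl_cons, bstep_shift, ih]

theorem fold_absorb (gty : List String) (f : String → Option (Int × String)) (c0 : String)
    (hlow : ∀ t ∈ gty, ∀ p, f t = some p → 0 ≤ p.1) :
    gty.foldl (fun b t => bstep b (f t)) (some (0, c0)) = some (0, c0) := by
  induction gty with
  | nil => rfl
  | cons t ts ih =>
    simp only [List.foldl_cons]
    have hstep : bstep (some (0, c0)) (f t) = some (0, c0) := by
      cases hf : f t with
      | none => rfl
      | some p =>
        have := hlow t (List.mem_cons_self ..) p hf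
        simp only [bstep]
        have : ¬ p.1 < (0 : Int) := by omega
        simp [this]
    rw [hstep]
    exact ih (fun t ht => hlow t (List.mem_cons_of_mem _ ht))

theorem fold_zero (f : String → Option (Int × String)) (c0 : String) :
    ∀ (gty : List String) (acc : Option (Int × String)),
    (∀ t ∈ gty, ∀ p, f t = some p → 0 ≤ p.1) →
    (∀ t ∈ gty, ∀ c, f t = some (0, c) → c = c0) →
    (acc = none ∨ ∃ p, acc = some p ∧ 0 ≤ p.1 ∧ (p.1 = 0 → p.2 = c0)) →
    (∃ t ∈ gty, f t = some (0, c0)) →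
    gty.foldl (fun b t => bstep b (f t)) acc = some (0, c0) := by
  intro gty
  induction gty with
  | nil =>
    intro acc _ _ _ hex
    rcases hex with ⟨t, ht, _⟩
    exact absurd ht (List.not_mem_nil)
  | cons t ts ih =>
    intro acc hlow hcat hacc hex
    simp only [List.foldl_cons]
    rcases hex with ⟨t0, ht0, hf0⟩
    rcases List.mem_cons.mp ht0 with rfl | ht0ts
    · -- the head is a rank-0 hit: the accumulator becomes (0, c0) and stays there
      have hstep : bstep acc (f t0) = some (0, c0) := by
        rw [hf0]
        rcases hacc with rfl | ⟨p, rfl, hp0, hpc⟩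
        · rfl
        · simp only [bstep]
          by_cases hlt : (0 : Int) < p.1
          · simp [hlt]
          · have h1 : p.1 = 0 := by omega
            have h2 : p.2 = c0 := hpc h1
            simp [Prod.ext_iff, h1, h2]
      rw [hstep]
      exact fold_absorb ts f c0 (fun s hs => hlow s (List.mem_cons_of_mem _ hs))
    · -- the witness lies in the tail: the accumulator invariant is maintained
      apply ih _ (fun s hs => hlow s (List.mem_cons_of_mem _ hs))
        (fun s hs => hcat s (List.mem_cons_of_mem _ hs)) _ ⟨t0, ht0ts, hf0⟩
      cases hf : f t with
      | none =>
        simp only [bstep]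
        exact hacc
      | some q =>
        right
        have hq0 : 0 ≤ q.1 := hlow t (List.mem_cons_self ..) q hf
        have hqc : q.1 = 0 → q.2 = c0 := by
          intro h0
          obtain ⟨q1, q2⟩ := q
          simp only at h0
          subst h0
          exact hcat t (List.mem_cons_self ..) q2 hf
        rcases hacc with rfl | ⟨p, rfl, hp0, hpc⟩
        · exact ⟨q, rfl, hq0, hqc⟩
        · simp only [bstep]
          by_cases hlt : q.1 < p.1
          · exact ⟨q, by simp [hlt], hq0, hqc⟩
          · exact ⟨p, by simp [hlt], hp0, hpc⟩

-- the crux: B's min-rank fold over the input equals A's first-match scan over the rules.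
theorem fold_eq_find (R : List (List String × String)) (gty : List String) :
    (gty.foldl (fun b t => bstep b (firstHit R 0 t)) none).map Prod.snd
      = (R.find? (fun r => r.1.any (fun s => gty.contains s))).map Prod.snd := by
  induction R with
  | nil =>
    have : gty.foldl (fun b t => bstep b (firstHit [] 0 t)) none = none := by
      induction gty with
      | nil => rfl
      | cons t ts ih => simp only [List.foldl_cons, firstHit, bstep]; exact ih
    simp [this]
  | cons r rs ih =>
    cases hp : (r.1.any (fun s => gty.contains s)) with
    | true =>
      have hfind : (r :: rs).find? (fun r => r.1.any (fun s => gty.contains s)) = some r := by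
        simp only [List.find?_cons]
        rw [hp]
      simp only [List.any_eq_true] at hp
      rcases hp with ⟨s, hs, hsg⟩
      have hsgty : s ∈ gty := by simpa using hsg
      have hfold : gty.foldl (fun b t => bstep b (firstHit (r :: rs) 0 t)) none = some (0, r.2) := by
        apply fold_zero _ r.2 gty none
        · intro t _ p h; exact firstHit_le _ _ _ _ h
        · intro t _ c h
          by_cases hm : t ∈ r.1
          · simp [firstHit, hm] at h
            exact h.symm
          · rw [firstHit, if_neg hm] at h
            have := firstHit_le rs 1 t _ h
            simp at this
        · exact Or.inl rfl
        · exact ⟨s, hsgty, by simp [firstHit, hs]⟩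
      rw [hfind, hfold]
      rfl
    | false =>
      have hfind : (r :: rs).find? (fun r => r.1.any (fun s => gty.contains s))
          = rs.find? (fun r => r.1.any (fun s => gty.contains s)) := by
        simp only [List.find?_cons]
        rw [hp]
      have hnm : ∀ t ∈ gty, firstHit (r :: rs) 0 t = shift1 (firstHit rs 0 t) := by
        intro t ht
        have : t ∉ r.1 := by
          intro hc
          have : r.1.any (fun s => gty.contains s) = true :=
            List.any_eq_true.mpr ⟨t, hc, by simpa using ht⟩
          rw [hp] at this
          exact Bool.false_ne_true this
        rw [firstHit, if_neg this, show (0 : Int) + 1 = 0 + 1 from rfl, firstHit_succ]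
      have hcongr : gty.foldl (fun b t => bstep b (firstHit (r :: rs) 0 t)) none
          = gty.foldl (fun b t => bstep b (shift1 (firstHit rs 0 t))) none := by
        apply PySem.List.foldl_congr_mem
        intro b t ht
        rw [hnm t ht]
      have hsnd : (shift1 (gty.foldl (fun b t => bstep b (firstHit rs 0 t)) none)).map Prod.snd
          = (gty.foldl (fun b t => bstep b (firstHit rs 0 t)) none).map Prod.snd := by
        cases gty.foldl (fun b t => bstep b (firstHit rs 0 t)) none <;> rfl
      rw [hcongr, show (none : Option (Int × String)) = shift1 none from rfl, fold_shift,
        hsnd, ih, hfind]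

-- A's whole cascade is a single first-match scan over rules ++ fallbacks.
theorem A_eq_find (record : List (String × List String)) :
    tier1_google_types_py record =
      match (PySem.Dict.mk record).get? "gty" with
      | none => (none, false)
      | some gty =>
        if gty.isEmpty then (none, false)
        else
          match (gtypeRules ++ fallbackRules).find?
              (fun r => r.1.any (fun s => gty.contains s)) with
          | some r => (some r.2, true)
          | none => (none, false) := by
  unfold tier1_google_types_py
  cases (PySem.Dict.mk record).get? "gty" with
  | none => rfl
  | some gty =>
    by_cases he : gty.isEmpty
    · simp [he]
    · simp only [he, if_neg, Bool.false_eq_true, not_false_iff]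
      have hfc : gtypeRules.find? (fun r => !(PySem.Set.inter (PySem.Set.ofList gty) r.1).isEmpty)
          = gtypeRules.find? (fun r => r.1.any (fun s => gty.contains s)) := by
        apply find?_congr'
        intro r _
        rw [Bool.eq_iff_iff]
        simp only [Bool.not_eq_eq_eq_not, Bool.not_true, List.isEmpty_eq_false_iff_exists_mem,
          List.any_eq_true, PySem.Set.mem_inter, PySem.Set.mem_ofList]
        constructor
        · rintro ⟨y, hy1, hy2⟩
          exact ⟨y, hy2, by simpa using hy1⟩
        · rintro ⟨s, hs, hsg⟩
          exact ⟨s, by simpa using hsg, hs⟩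
      rw [List.find?_append, hfc]
      cases gtypeRules.find? (fun r => r.1.any (fun s => gty.contains s)) with
      | some r => simp
      | none =>
        simp only [Option.none_or]
        by_cases hr : "restaurant" ∈ gty <;> by_cases hfam : "family_restaurant" ∈ gty <;>
          by_cases hfd : "food" ∈ gty <;>
          simp [fallbackRules, List.find?, PySem.Set.mem_ofList, PySem.Set.contains_eq_listContains,
            hr, hfam, hfd]

-- ===== VERDICT (by name: the statement is the Claim_ definition above) =====
theorem tier1_google_types_py_spec : Claim_equal_tier1_google_types_py := by
  intro record _
  unfold Spec_tier1_google_types_py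
  rw [A_eq_find]
  unfold tier1_google_types_py_alt
  cases (PySem.Dict.mk record).get? "gty" with
  | none => rfl
  | some gty =>
    by_cases he : gty.isEmpty
    · simp [he]
    · simp only [he, if_neg, Bool.false_eq_true, not_false_iff]
      have hfold : gty.foldl (fun best t =>
            match typeIndex.get? t with
            | some hit =>
              match best with
              | none => some hit
              | some b => if hit.1 < b.1 then some hit else some b
            | none => best) none
          = gty.foldl (fun b t => bstep b (firstHit (gtypeRules ++ fallbackRules) 0 t)) none := by
        apply PySem.List.foldl_congr_mem
        intro b t _
        rw [← typeIndex_get?]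
        cases typeIndex.get? t <;> rfl
      have := fold_eq_find (gtypeRules ++ fallbackRules) gty
      rw [hfold]
      cases hA : (gtypeRules ++ fallbackRules).find? (fun r => r.1.any (fun s => gty.contains s)) with
      | none =>
        rw [hA] at this
        simp only [Option.map_none, Option.map_eq_none_iff] at this
        simp [this]
      | some r =>
        rw [hA] at this
        cases hB : gty.foldl (fun b t => bstep b (firstHit (gtypeRules ++ fallbackRules) 0 t)) none with
        | none => rw [hB] at this; simp at this
        | some b =>
          rw [hB] at this
          simp only [Option.map_some, Option.some_inj] at this
          simp [this]
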